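-- pv_equiv track=rewrite | github.com/vahidNaghshin/Relative_Freq_analysis_of_monoalphabetic_encryption | freq_anal_attk.py | SearchWordTHAT
-- ===== SOURCE A (Python) =====
-- def SearchWordTHAT(listComb, cipherText):
--     # this func search for all possible nimination of
--     # the word THAT in cipher text
--     _word_H = []
--     _valid_comb_for_THAT = []
--     for i in range(len(listComb)):
--         l1 = listComb[i][1]
--         l2 = listComb[i][2]
--         for z in range(len(cipherText)-3):
--             if cipherText[z] == l1 and cipherText[z + 2] == l2\
--                     and cipherText[z + 3] == l1:
--                 _valid_comb_for_THAT.append([l2, l1])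
--                 _word_H.append(cipherText[z + 1])
--     return _valid_comb_for_THAT, _word_H
-- ===== SOURCE B (Python) =====
-- def SearchWordTHAT(listComb, cipherText):
--     # One pass over cipherText builds an index (l1, l2) -> middle letters of
--     # every "x?yx" window; each combination is then a single dict lookup.
--     idx = {}
--     for z in range(len(cipherText) - 3):
--         if cipherText[z] == cipherText[z + 3]:
--             idx.setdefault((cipherText[z], cipherText[z + 2]), []).append(cipherText[z + 1])
--     _valid_comb_for_THAT = []
--     _word_H = []
--     for comb in listComb:
--         l1 = comb[1]
--         l2 = comb[2]
--         ms = idx.get((l1, l2), [])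
--         _valid_comb_for_THAT.extend([l2, l1] for _ in ms)
--         _word_H.extend(ms)
--     return _valid_comb_for_THAT, _word_H
-- ===== Notes on version B (the rewrite author's own statement) =====
-- stated objective: faster
-- what changed: A rescans every window of the cipher text for each combination; B scans the cipher text once, building a dict (l1,l2)->list of middle letters for every x?yx window, and then answers each combination with a single dict lookup.
import Mathlib
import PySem

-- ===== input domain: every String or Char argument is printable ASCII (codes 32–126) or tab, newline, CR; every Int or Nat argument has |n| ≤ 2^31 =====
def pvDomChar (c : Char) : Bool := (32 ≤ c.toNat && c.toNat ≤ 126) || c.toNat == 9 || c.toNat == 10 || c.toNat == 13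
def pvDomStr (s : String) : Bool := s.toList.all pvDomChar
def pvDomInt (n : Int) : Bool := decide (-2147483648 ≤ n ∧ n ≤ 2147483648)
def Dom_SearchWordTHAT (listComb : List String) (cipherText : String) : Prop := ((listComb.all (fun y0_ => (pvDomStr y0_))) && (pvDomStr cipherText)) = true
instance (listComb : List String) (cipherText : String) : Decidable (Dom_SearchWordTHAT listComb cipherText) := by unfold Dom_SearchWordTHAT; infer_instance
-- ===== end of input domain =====

-- B replaces A's rescans of the cipher text per combination by one indexing pass
-- (dict (l1,l2) -> middle letters) plus a lookup per combination (objective: faster).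

-- ===== PORT A =====
-- literal port of A: for each combination index i, scan every window of the cipher text
def SearchWordTHAT (listComb : List String) (cipherText : String) : List (List String) × List String :=
  let ct := cipherText.toList
  (PySem.List.pyRange 0 (listComb.length : Int) 1).foldl
    (fun (acc : List (List String) × List String) i =>
      let s := (PySem.List.pyGetD listComb i "").toList
      let l1 := PySem.List.pyGetD s 1 ' '
      let l2 := PySem.List.pyGetD s 2 ' '
      (PySem.List.pyRange 0 ((ct.length : Int) - 3) 1).foldl
        (fun (acc : List (List String) × List String) z =>
          if PySem.List.pyGetD ct z ' ' = l1 ∧ PySem.List.pyGetD ct (z + 2) ' ' = l2 ∧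
              PySem.List.pyGetD ct (z + 3) ' ' = l1 then
            (acc.1 ++ [[String.ofList [l2], String.ofList [l1]]], acc.2 ++ [String.ofList [PySem.List.pyGetD ct (z + 1) ' ']])
          else acc) acc)
    ([], [])

-- ===== PORT B =====
-- literal port of B: one pass builds idx : (l1,l2) -> middles, then one lookup per combination
def SearchWordTHAT_alt (listComb : List String) (cipherText : String) : List (List String) × List String :=
  let ct := cipherText.toList
  let idx : PySem.Dict (Char × Char) (List Char) :=
    (PySem.List.pyRange 0 ((ct.length : Int) - 3) 1).foldl
      (fun d z =>
        if PySem.List.pyGetD ct z ' ' = PySem.List.pyGetD ct (z + 3) ' ' then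
          d.modify (PySem.List.pyGetD ct z ' ', PySem.List.pyGetD ct (z + 2) ' ') []
            (fun ms => ms ++ [PySem.List.pyGetD ct (z + 1) ' '])
        else d)
      PySem.Dict.empty
  listComb.foldl
    (fun (acc : List (List String) × List String) comb =>
      let l1 := PySem.List.pyGetD comb.toList 1 ' '
      let l2 := PySem.List.pyGetD comb.toList 2 ' '
      let ms := idx.getD (l1, l2) []
      (acc.1 ++ ms.map (fun _ => [String.ofList [l2], String.ofList [l1]]),
       acc.2 ++ ms.map (fun m => String.ofList [m])))
    ([], [])

-- ===== PRECONDITION & SPEC =====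
-- Pre_ excludes only inputs where Python A raises IndexError: a combination string shorter than 3 characters.
def Pre_SearchWordTHAT (listComb : List String) (_cipherText : String) : Prop :=
  (listComb.all (fun s => 3 ≤ s.toList.length)) = true
instance (listComb : List String) (cipherText : String) : Decidable (Pre_SearchWordTHAT listComb cipherText) := by unfold Pre_SearchWordTHAT; infer_instance
def pvWitness_SearchWordTHAT : List String × String := (["THA", "xaxb"], "xaybxcax")

def Spec_SearchWordTHAT (listComb : List String) (cipherText : String) (out : List (List String) × List String) : Prop := out = SearchWordTHAT_alt listComb cipherText
instance (listComb : List String) (cipherText : String) (out : List (List String) × List String) : Decidable (Spec_SearchWordTHAT listComb cipherText out) := by unfold Spec_SearchWordTHAT; infer_instance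

-- ===== CLAIM (what is proved, stated in full; the proofs are below) =====
def Claim_equal_SearchWordTHAT : Prop := ∀ (listComb : List String) (cipherText : String), Dom_SearchWordTHAT listComb cipherText → Pre_SearchWordTHAT listComb cipherText → Spec_SearchWordTHAT listComb cipherText (SearchWordTHAT listComb cipherText)

-- ===== LEMMAS AND PROOFS =====

-- A's inner scan appends a pair of singleton lists per hit; in closed form it appends two maps over the hits.
theorem foldl_two_append {α β γ : Type} (p : γ → Prop) [DecidablePred p] (f : γ → α) (g : γ → β) :
    ∀ (zs : List γ) (acc : List α × List β),
      zs.foldl (fun acc z => if p z then (acc.1 ++ [f z], acc.2 ++ [g z]) else acc) acc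
        = (acc.1 ++ (zs.filter (fun z => decide (p z))).map f,
           acc.2 ++ (zs.filter (fun z => decide (p z))).map g) := by
  intro zs
  induction zs with
  | nil => intro acc; simp
  | cons z zs ih =>
    intro acc
    by_cases hp : p z <;> simp [List.foldl_cons, hp, ih]

-- the guarded fold that builds B's dict, rewritten as a fold over the filtered list of (key, middle) pairs
theorem dict_build_eq (ct : List Char) :
    ((PySem.List.pyRange 0 ((ct.length : Int) - 3) 1).foldl
      (fun d z =>
        if PySem.List.pyGetD ct z ' ' = PySem.List.pyGetD ct (z + 3) ' ' then
          d.modify (PySem.List.pyGetD ct z ' ', PySem.List.pyGetD ct (z + 2) ' ') []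
            (fun ms => ms ++ [PySem.List.pyGetD ct (z + 1) ' '])
        else d)
      PySem.Dict.empty)
    = (((PySem.List.pyRange 0 ((ct.length : Int) - 3) 1).filter
          (fun z => PySem.List.pyGetD ct z ' ' == PySem.List.pyGetD ct (z + 3) ' ')).map
        (fun z => ((PySem.List.pyGetD ct z ' ', PySem.List.pyGetD ct (z + 2) ' '),
                   PySem.List.pyGetD ct (z + 1) ' '))).foldl
        (fun d p => d.modify p.1 [] (fun ms => ms ++ [p.2])) PySem.Dict.empty := by
  rw [List.foldl_map, List.foldl_filter]
  apply PySem.List.foldl_congr_mem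
  intro d z _
  by_cases h : PySem.List.pyGetD ct z ' ' = PySem.List.pyGetD ct (z + 3) ' ' <;> simp [h]

-- B's lookup for (l1, l2) is exactly the list of middles of A's matching windows
theorem middles_eq (ct : List Char) (l1 l2 : Char) :
    (((PySem.List.pyRange 0 ((ct.length : Int) - 3) 1).foldl
        (fun d z =>
          if PySem.List.pyGetD ct z ' ' = PySem.List.pyGetD ct (z + 3) ' ' then
            d.modify (PySem.List.pyGetD ct z ' ', PySem.List.pyGetD ct (z + 2) ' ') []
              (fun ms => ms ++ [PySem.List.pyGetD ct (z + 1) ' '])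
          else d)
        PySem.Dict.empty).getD (l1, l2) [])
    = ((PySem.List.pyRange 0 ((ct.length : Int) - 3) 1).filter
        (fun z => decide (PySem.List.pyGetD ct z ' ' = l1 ∧ PySem.List.pyGetD ct (z + 2) ' ' = l2 ∧
                          PySem.List.pyGetD ct (z + 3) ' ' = l1))).map
        (fun z => PySem.List.pyGetD ct (z + 1) ' ') := by
  rw [dict_build_eq, PySem.Dict.getD_foldl_modify_append, PySem.Dict.getD_empty, List.nil_append,
    List.filter_map, List.map_map]
  simp only [Function.comp_def, List.filter_filter]
  congr 1
  apply List.filter_congr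
  intro z _
  by_cases h1 : PySem.List.pyGetD ct z ' ' = l1 <;>
    by_cases h2 : PySem.List.pyGetD ct (z + 2) ' ' = l2 <;>
    by_cases h3 : PySem.List.pyGetD ct (z + 3) ' ' = l1 <;>
    simp [h1, h2, h3, Prod.ext_iff] <;> intro h <;> simp_all

-- ===== VERDICT (by name: the statement is the Claim_ definition above) =====
theorem SearchWordTHAT_spec : Claim_equal_SearchWordTHAT := by
  intro listComb cipherText _ _
  unfold Spec_SearchWordTHAT SearchWordTHAT SearchWordTHAT_alt
  dsimp only
  refine Eq.trans
    (PySem.List.foldl_pyRange_zero_pyGetD' listComb ""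
      (fun acc s =>
        (PySem.List.pyRange 0 ((cipherText.toList.length : Int) - 3) 1).foldl
          (fun (acc : List (List String) × List String) z =>
            if PySem.List.pyGetD cipherText.toList z ' ' = PySem.List.pyGetD s.toList 1 ' ' ∧
                PySem.List.pyGetD cipherText.toList (z + 2) ' ' = PySem.List.pyGetD s.toList 2 ' ' ∧
                PySem.List.pyGetD cipherText.toList (z + 3) ' ' = PySem.List.pyGetD s.toList 1 ' ' then
              (acc.1 ++ [[String.ofList [PySem.List.pyGetD s.toList 2 ' '], String.ofList [PySem.List.pyGetD s.toList 1 ' ']]],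
               acc.2 ++ [String.ofList [PySem.List.pyGetD cipherText.toList (z + 1) ' ']])
            else acc) acc)
      ([], [])) ?_
  apply PySem.List.foldl_congr_mem
  intro acc comb _
  rw [foldl_two_append, middles_eq, List.map_map, List.map_map]
  rfl
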